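-- pv_equiv track=rewrite | github.com/dokoliho/prog1 | 07_Gui/lessons/aoc24_01.py | calculate_similarity_scores
-- ===== SOURCE A (Python) =====
-- def calculate_similarity_scores(left, right):
--     right_counts = {}
--     for num in right:
--         if num in right_counts:
--             right_counts[num] += 1
--         else:
--             right_counts[num] = 1
--     scores = []
--     for num in left:
--         if num not in right_counts:
--             scores.append(0)
--         else:
--             scores.append(right_counts[num] * num)
--     return scores
-- ===== SOURCE B (Python) =====
-- def calculate_similarity_scores(left, right):
--     scores = [0] * len(left)
--     for r in right:
--         for i, x in enumerate(left):
--             if x == r: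
--                 scores[i] += r
--     return scores
-- ===== Notes on version B (the rewrite author's own statement) =====
-- stated objective: alternative
-- what changed: Inverted the loop structure: instead of building a count dictionary over right and then looking up each left element, B preallocates a zero score per left position and scans right once, distributing each right element r into every position of left that equals it; no counts or lookups ever exist.
import Mathlib
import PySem

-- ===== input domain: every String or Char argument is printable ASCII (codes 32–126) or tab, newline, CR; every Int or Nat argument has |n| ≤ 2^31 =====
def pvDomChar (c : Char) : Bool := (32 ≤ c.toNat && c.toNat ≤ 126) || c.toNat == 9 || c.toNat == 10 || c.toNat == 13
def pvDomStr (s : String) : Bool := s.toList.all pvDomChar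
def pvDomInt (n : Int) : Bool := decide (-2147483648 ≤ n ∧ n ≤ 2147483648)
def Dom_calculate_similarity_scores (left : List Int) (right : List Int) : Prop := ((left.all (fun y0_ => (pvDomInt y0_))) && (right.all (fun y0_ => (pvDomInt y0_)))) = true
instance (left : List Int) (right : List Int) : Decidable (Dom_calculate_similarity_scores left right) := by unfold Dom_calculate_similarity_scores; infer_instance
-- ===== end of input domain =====

-- B inverts the loops: a zero score per left position, then one scan of right distributing each r into every matching position (alternative; not faster).
-- ===== PORT A =====
def pvBuildCounts (right : List Int) : PySem.Dict Int Int :=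
  right.foldl (fun d num =>
    if d.contains num then d.modify num 0 (· + 1) else d.insert num 1) PySem.Dict.empty

def calculate_similarity_scores (left : List Int) (right : List Int) : List Int :=
  let right_counts := pvBuildCounts right
  left.foldl (fun scores num =>
    if right_counts.contains num = false then scores ++ [0]
    else scores ++ [right_counts.getD num 0 * num]) []

-- ===== PORT B =====
-- scores = [0]*len(left); for r in right: for i,x in enumerate(left): if x==r: scores[i]+=r
-- (the in-place indexed update over enumerate(left) is rendered as the pointwise pass left.zip scores)
def calculate_similarity_scores_alt (left : List Int) (right : List Int) : List Int :=
  right.foldl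
    (fun scores r => (left.zip scores).map (fun p => if p.1 = r then p.2 + r else p.2))
    (List.replicate left.length 0)

-- ===== PRECONDITION & SPEC =====
def Spec_calculate_similarity_scores (left : List Int) (right : List Int) (out : List Int) : Prop := out = calculate_similarity_scores_alt left right
instance (left : List Int) (right : List Int) (out : List Int) : Decidable (Spec_calculate_similarity_scores left right out) := by unfold Spec_calculate_similarity_scores; infer_instance

-- ===== CLAIM (what is proved, stated in full; the proofs are below) =====
def Claim_equal_calculate_similarity_scores : Prop := ∀ (left : List Int) (right : List Int), Dom_calculate_similarity_scores left right → Spec_calculate_similarity_scores left right (calculate_similarity_scores left right)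

-- ===== LEMMAS AND PROOFS =====
theorem pvBuild_getD (right : List Int) (d : PySem.Dict Int Int) (v : Int) :
    (right.foldl (fun d num =>
      if d.contains num then d.modify num 0 (· + 1) else d.insert num 1) d).getD v 0
    = d.getD v 0 + right.count v := by
  induction right generalizing d with
  | nil => simp
  | cons x xs ih =>
    simp only [List.foldl_cons, ih, List.count_cons]
    by_cases hc : d.contains x
    · by_cases hv : v = x
      · subst hv; simp [hc, PySem.Dict.getD_modify_self]; omega
      · simp [hc, PySem.Dict.getD_modify, hv]
        exact fun h => hv h.symm
    · by_cases hv : v = x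
      · subst hv
        rw [if_neg (by simpa using hc), PySem.Dict.getD_insert_self,
            PySem.Dict.getD_of_not_contains d 0 (by simpa using hc)]
        simp; omega
      · simp [hc, PySem.Dict.getD_insert, hv]
        exact fun h => hv h.symm

theorem pvBuild_contains (right : List Int) (d : PySem.Dict Int Int) (v : Int) :
    (right.foldl (fun d num =>
      if d.contains num then d.modify num 0 (· + 1) else d.insert num 1) d).contains v
    = (d.contains v || decide (v ∈ right)) := by
  induction right generalizing d with
  | nil => simp
  | cons x xs ih =>
    simp only [List.foldl_cons, ih, List.mem_cons]
    by_cases hv : v = x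
    · subst hv
      by_cases hc : d.contains v
      · simp [hc, PySem.Dict.contains_modify]
      · simp [hc, PySem.Dict.contains_insert_self]
    · have hvx : (v == x) = false := by simp [hv]
      by_cases hc : d.contains x
      · simp [hc, hv, PySem.Dict.contains_modify, hvx]
      · simp [hc, hv, PySem.Dict.contains_insert, hvx]

-- A's result characterised: each score is count(right, x) * x
theorem pvA_eq_map (left right : List Int) :
    calculate_similarity_scores left right
      = left.map (fun x => (right.count x : Int) * x) := by
  unfold calculate_similarity_scores
  simp only
  have hstep : ∀ (scores : List Int) (num : Int),
      (if (pvBuildCounts right).contains num = false then scores ++ [0]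
       else scores ++ [(pvBuildCounts right).getD num 0 * num])
      = scores ++ [(right.count num : Int) * num] := by
    intro scores num
    have hg : (pvBuildCounts right).getD num 0 = right.count num := by
      simpa using pvBuild_getD right PySem.Dict.empty num
    by_cases hc : (pvBuildCounts right).contains num
    · simp [hc, hg]
    · have hm : num ∉ right := by
        have := pvBuild_contains right PySem.Dict.empty num
        simp [pvBuildCounts] at hc
        simpa [hc] using this.symm
      simp [hc, List.count_eq_zero_of_not_mem hm]
  calc left.foldl (fun scores num =>
        if (pvBuildCounts right).contains num = false then scores ++ [0]
        else scores ++ [(pvBuildCounts right).getD num 0 * num]) []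
      = left.foldl (fun scores num => scores ++ [(right.count num : Int) * num]) [] := by
        exact PySem.List.foldl_congr_mem _ _ _ _ (fun acc x _ => hstep acc x)
    _ = left.map (fun num => (right.count num : Int) * num) := by
        simpa using PySem.List.foldl_append_singleton_eq_map (l := left) (f := fun num => (right.count num : Int) * num) (acc := [])

theorem pvZipMap (l : List Int) (g : Int → Int) (f : Int × Int → Int) :
    (l.zip (l.map g)).map f = l.map (fun x => f (x, g x)) := by
  induction l with
  | nil => simp
  | cons x xs ih => simp [ih]

-- B's loop invariant: distributing rs into left.map g adds count(rs,x)*x pointwise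
theorem pvB_invariant (left rs : List Int) (g : Int → Int) :
    rs.foldl
      (fun scores r => (left.zip scores).map (fun p => if p.1 = r then p.2 + r else p.2))
      (left.map g)
    = left.map (fun x => g x + (rs.count x : Int) * x) := by
  induction rs generalizing g with
  | nil => simp
  | cons r rs ih =>
    simp only [List.foldl_cons]
    rw [pvZipMap left g (fun p => if p.1 = r then p.2 + r else p.2)]
    rw [show (left.map fun x => if (x, g x).1 = r then (x, g x).2 + r else (x, g x).2)
          = left.map (fun x => if x = r then g x + r else g x) from rfl]
    rw [ih (fun x => if x = r then g x + r else g x)]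
    apply List.map_congr_left
    intro x _
    by_cases hx : x = r
    · subst hx
      simp
      ring
    · simp [hx, Ne.symm hx]

-- ===== VERDICT (by name: the statement is the Claim_ definition above) =====
theorem calculate_similarity_scores_spec : Claim_equal_calculate_similarity_scores := by
  intro left right _
  unfold Spec_calculate_similarity_scores
  rw [pvA_eq_map]
  unfold calculate_similarity_scores_alt
  rw [show List.replicate left.length (0 : Int) = left.map (fun _ => 0) by
        simp [List.map_const']]
  rw [pvB_invariant left right (fun _ => 0)]
  simp
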